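-- pv_equiv track=rewrite | github.com/GizawAAiT/Codeforces | A_Vanya_and_Cubes.py | solve
-- ===== SOURCE A (Python) =====
-- def solve(n):
--     INF = 10**4
--
--     layer = 0
--     for h in range(INF):
--         layer += (h+1)
--         n -= layer
--
--         if n < 0:
--             return h
-- ===== SOURCE B (Python) =====
-- def solve(n):
--     # Binary search for the largest m in [0, 10**4] with tet(m) <= n,
--     # where tet(m) = m*(m+1)*(m+2)//6 is the cube count of m complete layers.
--     def tet(m):
--         return m * (m + 1) * (m + 2) // 6
--     lo, hi = 0, 10 ** 4
--     while lo < hi: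
--         mid = (lo + hi + 1) // 2
--         if tet(mid) <= n:
--             lo = mid
--         else:
--             hi = mid - 1
--     return lo
-- ===== Notes on version B (the rewrite author's own statement) =====
-- stated objective: faster
-- what changed: Replaces A's linear layer-accumulation loop with a closed-form tetrahedral number tet(m)=m(m+1)(m+2)//6 and a binary search over m in [0,10000] for the largest m with tet(m) <= n.
import Mathlib
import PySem

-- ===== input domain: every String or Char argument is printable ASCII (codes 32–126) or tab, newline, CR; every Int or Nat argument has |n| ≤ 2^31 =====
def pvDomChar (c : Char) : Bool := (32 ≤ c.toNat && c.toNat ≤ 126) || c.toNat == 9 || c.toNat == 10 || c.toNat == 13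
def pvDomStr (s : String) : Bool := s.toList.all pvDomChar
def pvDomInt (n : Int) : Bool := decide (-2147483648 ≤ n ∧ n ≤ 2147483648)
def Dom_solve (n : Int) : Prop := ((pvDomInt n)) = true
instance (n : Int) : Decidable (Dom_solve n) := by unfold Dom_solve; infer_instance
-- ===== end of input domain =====

-- B replaces A's linear layer-accumulation loop by a binary search on the
-- closed-form tetrahedral number tet(m) = m(m+1)(m+2)//6 (objective: faster).

-- ===== PORT A =====
-- A's for-loop over range(10**4) with early return, state (n, layer).
def solveLoop (n layer : Int) (h : Nat) : Int :=
  if h < 10000 then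
    let layer' := layer + ((h : Int) + 1)
    let n' := n - layer'
    if n' < 0 then (h : Int) else solveLoop n' layer' (h + 1)
  else 0  -- loop fall-through: Python A returns None here; excluded by Pre_solve
termination_by 10000 - h

def solve (n : Int) : Int := solveLoop n 0 0

-- ===== PORT B =====
def tetB (m : Int) : Int := PySem.Int.floordiv (m * (m + 1) * (m + 2)) 6

lemma bsearch_mid_bounds {lo hi : Int} (h : lo < hi) :
    lo + 1 ≤ PySem.Int.floordiv (lo + hi + 1) 2 ∧ PySem.Int.floordiv (lo + hi + 1) 2 ≤ hi := by
  rw [PySem.Int.floordiv_eq_ediv_of_pos (by norm_num)]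
  omega

def bsearch (n lo hi : Int) : Int :=
  if hlt : lo < hi then
    let mid := PySem.Int.floordiv (lo + hi + 1) 2
    if tetB mid ≤ n then bsearch n mid hi else bsearch n lo (mid - 1)
  else lo
termination_by (hi - lo).toNat
decreasing_by
  · have := bsearch_mid_bounds hlt; omega
  · have := bsearch_mid_bounds hlt; omega

def solve_alt (n : Int) : Int := bsearch n 0 10000

-- ===== PRECONDITION & SPEC =====
-- Pre_ excludes n ≥ Tet(10000) = 166716670000 (all far outside Dom_solve), where
-- A's loop falls through and Python returns None, which is not an Int.
def Pre_solve (n : Int) : Prop := n < 166716670000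
instance (n : Int) : Decidable (Pre_solve n) := by unfold Pre_solve; infer_instance
def pvWitness_solve : Int := 10
def Spec_solve (n : Int) (out : Int) : Prop := out = solve_alt n
instance (n : Int) (out : Int) : Decidable (Spec_solve n out) := by unfold Spec_solve; infer_instance

-- ===== CLAIM (what is proved, stated in full; the proofs are below) =====
def Claim_equal_solve : Prop := ∀ (n : Int), Dom_solve n → Pre_solve n → Spec_solve n (solve n)

-- ===== LEMMAS AND PROOFS =====

-- exact integer loop invariants of A: triangular and tetrahedral numbers
def tri : Nat → Int
  | 0 => 0
  | h + 1 => tri h + ((h : Int) + 1)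

def tetR : Nat → Int
  | 0 => 0
  | h + 1 => tetR h + tri (h + 1)

lemma two_tri (h : Nat) : 2 * tri h = (h : Int) * ((h : Int) + 1) := by
  induction h with
  | zero => simp [tri]
  | succ h ih => simp only [tri]; push_cast; linear_combination ih

lemma six_tetR (m : Nat) : 6 * tetR m = (m : Int) * ((m : Int) + 1) * ((m : Int) + 2) := by
  induction m with
  | zero => simp [tetR]
  | succ m ih =>
    have h1 : 2 * tri (m + 1) = ((m : Int) + 1) * ((m : Int) + 2) := by
      have := two_tri (m + 1); push_cast at this; linarith
    simp only [tetR]; push_cast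
    linear_combination ih + 3 * h1

lemma tetB_natCast (m : Nat) : tetB (m : Int) = tetR m := by
  unfold tetB
  rw [PySem.Int.floordiv_eq_ediv_of_pos (by norm_num), ← six_tetR m]
  exact Int.mul_ediv_cancel_left _ (by norm_num)

lemma tetR_succ_lt (m : Nat) : tetR m < tetR (m + 1) := by
  have h1 := two_tri (m + 1)
  have : (0 : Int) < tri (m + 1) := by push_cast at h1; nlinarith [Int.natCast_nonneg m]
  simp only [tetR]; omega

lemma tetR_mono {a b : Nat} (h : a ≤ b) : tetR a ≤ tetR b := by
  induction h with
  | refl => exact le_rfl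
  | @step b h ih => exact le_trans ih (tetR_succ_lt b).le

-- the characterisation both ports satisfy
def Good (n0 : Int) (m : Nat) : Prop := (m = 0 ∨ tetR m ≤ n0) ∧ n0 < tetR (m + 1)

lemma good_unique {n0 : Int} {m1 m2 : Nat} (h1 : Good n0 m1) (h2 : Good n0 m2) : m1 = m2 := by
  rcases Nat.lt_trichotomy m1 m2 with hlt | heq | hgt
  · rcases h2.1 with h0 | hle
    · omega
    · have := tetR_mono (show m1 + 1 ≤ m2 by omega)
      have := h1.2; omega
  · exact heq
  · rcases h1.1 with h0 | hle
    · omega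
    · have := tetR_mono (show m2 + 1 ≤ m1 by omega)
      have := h2.2; omega

lemma loopA_good : ∀ (d h : Nat), h + d = 10000 → ∀ n0 : Int, n0 < tetR 10000 →
    (h = 0 ∨ tetR h ≤ n0) →
    ∃ m : Nat, solveLoop (n0 - tetR h) (tri h) h = (m : Int) ∧ Good n0 m := by
  intro d
  induction d with
  | zero =>
    intro h hsum n0 hbig hinv
    rcases hinv with h0 | hle
    · omega
    · have : h = 10000 := by omega
      subst this; omega
  | succ d ih =>
    intro h hsum n0 hbig hinv
    have hlt : h < 10000 := by omega
    rw [solveLoop, if_pos hlt]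
    have e1 : tri h + ((h : Int) + 1) = tri (h + 1) := by simp [tri]
    have e2 : n0 - tetR h - tri (h + 1) = n0 - tetR (h + 1) := by simp [tetR]; ring
    simp only [e1, e2]
    by_cases hneg : n0 - tetR (h + 1) < 0
    · rw [if_pos hneg]
      exact ⟨h, rfl, hinv, by omega⟩
    · rw [if_neg hneg]
      exact ih (h + 1) (by omega) n0 hbig (Or.inr (by omega))

lemma bsearch_good : ∀ (k : Nat) (n0 lo hi : Int), (hi - lo).toNat = k →
    0 ≤ lo → lo ≤ hi → (lo = 0 ∨ tetB lo ≤ n0) → n0 < tetB (hi + 1) →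
    ∃ m : Nat, bsearch n0 lo hi = (m : Int) ∧ Good n0 m := by
  intro k
  induction k using Nat.strong_induction_on with
  | _ k ih =>
    intro n0 lo hi hk h0 hle hinv hub
    rw [bsearch]
    by_cases hlt : lo < hi
    · rw [dif_pos hlt]
      obtain ⟨hm1, hm2⟩ := bsearch_mid_bounds hlt
      by_cases hc : tetB (PySem.Int.floordiv (lo + hi + 1) 2) ≤ n0
      · simp only [hc, if_pos]
        exact ih ((hi - PySem.Int.floordiv (lo + hi + 1) 2).toNat) (by omega) n0 _ hi rfl
          (by omega) (by omega) (Or.inr hc) hub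
      · simp only [hc, if_neg, not_false_iff]
        refine ih ((PySem.Int.floordiv (lo + hi + 1) 2 - 1 - lo).toNat) (by omega) n0 lo _ rfl
          h0 (by omega) hinv ?_
        have : PySem.Int.floordiv (lo + hi + 1) 2 - 1 + 1 = PySem.Int.floordiv (lo + hi + 1) 2 := by ring
        rw [this]; omega
    · rw [dif_neg hlt]
      have heq : lo = hi := by omega
      subst heq
      refine ⟨lo.toNat, by omega, ?_, ?_⟩
      · rcases hinv with hz | hc
        · exact Or.inl (by omega)
        · refine Or.inr ?_
          rw [← tetB_natCast lo.toNat] at *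
          have : ((lo.toNat : Int)) = lo := by omega
          rw [this]; exact hc
      · have : ((lo.toNat : Nat) + 1 : Nat) = (lo + 1).toNat := by omega
        have hcast : ((lo.toNat + 1 : Nat) : Int) = lo + 1 := by push_cast; omega
        rw [← tetB_natCast (lo.toNat + 1), hcast]
        omega

lemma tetR_10000 : tetR 10000 = 166716670000 := by
  have := six_tetR 10000
  norm_num at this
  omega

-- ===== VERDICT (by name: the statement is the Claim_ definition above) =====
theorem solve_spec : Claim_equal_solve := by
  intro n _hdom hpre
  unfold Spec_solve
  have hbig : n < tetR 10000 := by rw [tetR_10000]; exact hpre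
  have hA : ∃ m : Nat, solve n = (m : Int) ∧ Good n m := by
    have := loopA_good 10000 0 rfl n hbig (Or.inl rfl)
    simpa [solve, tri, tetR] using this
  have hB : ∃ m : Nat, solve_alt n = (m : Int) ∧ Good n m := by
    have hub : n < tetB (10000 + 1) := by
      have : ((10001 : Nat) : Int) = (10000 : Int) + 1 := by norm_num
      rw [← this, tetB_natCast]
      have := tetR_mono (show 10000 ≤ 10001 by omega)
      omega
    exact bsearch_good ((10000 : Int) - 0).toNat n 0 10000 rfl (by omega) (by omega)
      (Or.inl rfl) hub
  obtain ⟨m1, e1, g1⟩ := hA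
  obtain ⟨m2, e2, g2⟩ := hB
  rw [e1, e2, good_unique g1 g2]
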